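-- pv_equiv track=rewrite | github.com/superduper-io/superduper | superduper/backends/base/data_backend.py | _do_filter
-- ===== SOURCE A (Python) =====
-- def _do_filter(docs, condition):
--     if not condition:
--         return docs
--
--     def do_test(r):
--         for k, v in condition.items():
--             if r.get(k) != v:
--                 return False
--         return True
--
--     return [r for r in docs if do_test(r)]
-- ===== SOURCE B (Python) =====
-- def _do_filter(docs, condition):
--     # Progressive filtering: narrow the doc list once per condition entry.
--     result = docs
--     for k, v in condition.items():
--         result = [r for r in result if r.get(k) == v]
--     return result
-- ===== Notes on version B (the rewrite author's own statement) =====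
-- stated objective: alternative
-- what changed: Replaced the per-document all-conditions test (inner short-circuit loop inside one pass over docs) by progressive filtering: an outer loop over the condition entries that repeatedly narrows the document list, with the empty-condition case returning docs unchanged since the loop never runs.
import Mathlib
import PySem

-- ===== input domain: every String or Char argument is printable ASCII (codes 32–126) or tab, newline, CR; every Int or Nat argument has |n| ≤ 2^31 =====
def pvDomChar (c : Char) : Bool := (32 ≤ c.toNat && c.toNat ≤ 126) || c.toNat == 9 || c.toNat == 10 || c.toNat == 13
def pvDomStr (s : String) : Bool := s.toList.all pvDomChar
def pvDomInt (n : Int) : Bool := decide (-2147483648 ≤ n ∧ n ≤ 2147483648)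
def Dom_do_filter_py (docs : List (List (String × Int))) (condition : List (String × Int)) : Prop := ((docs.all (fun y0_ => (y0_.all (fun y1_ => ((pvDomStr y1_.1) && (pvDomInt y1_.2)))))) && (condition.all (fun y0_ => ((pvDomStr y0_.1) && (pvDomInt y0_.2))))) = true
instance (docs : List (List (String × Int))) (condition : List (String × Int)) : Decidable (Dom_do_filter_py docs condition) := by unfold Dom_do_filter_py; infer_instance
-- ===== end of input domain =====

-- B changes the loop shape only (progressive filtering over conditions vs per-doc all-match test); return value proved identical.

-- ===== PORT A =====
-- r.get(k): first-match association-list lookup (dict keys are unique)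
def doTest (condition : List (String × Int)) (r : List (String × Int)) : Bool :=
  match condition with
  | [] => true
  | (k, v) :: rest => if r.lookup k ≠ some v then false else doTest rest r

def do_filter_py (docs : List (List (String × Int))) (condition : List (String × Int)) : List (List (String × Int)) :=
  if condition.isEmpty then docs
  else docs.filter (doTest condition)

-- ===== PORT B =====
def do_filter_py_alt (docs : List (List (String × Int))) (condition : List (String × Int)) : List (List (String × Int)) :=
  condition.foldl (fun res kv => res.filter (fun r => r.lookup kv.1 == some kv.2)) docs

-- ===== PRECONDITION & SPEC =====
def Spec_do_filter_py (docs : List (List (String × Int))) (condition : List (String × Int)) (out : List (List (String × Int))) : Prop := out = do_filter_py_alt docs condition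
instance (docs : List (List (String × Int))) (condition : List (String × Int)) (out : List (List (String × Int))) : Decidable (Spec_do_filter_py docs condition out) := by unfold Spec_do_filter_py; infer_instance

-- ===== CLAIM (what is proved, stated in full; the proofs are below) =====
def Claim_equal_do_filter_py : Prop := ∀ (docs : List (List (String × Int))) (condition : List (String × Int)), Dom_do_filter_py docs condition → Spec_do_filter_py docs condition (do_filter_py docs condition)

-- ===== LEMMAS AND PROOFS =====

-- The sequence of filters in B collapses to one filter with A's conjunctive test.
theorem alt_eq_filter (condition : List (String × Int)) (docs : List (List (String × Int))) :
    do_filter_py_alt docs condition = docs.filter (doTest condition) := by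
  induction condition generalizing docs with
  | nil => simp [do_filter_py_alt, doTest]
  | cons kv rest ih =>
    obtain ⟨k, v⟩ := kv
    simp only [do_filter_py_alt, List.foldl_cons] at ih ⊢
    rw [ih, List.filter_filter]
    apply List.filter_congr
    intro r _
    by_cases h : r.lookup k = some v <;> simp [doTest, h]

-- ===== VERDICT (by name: the statement is the Claim_ definition above) =====
theorem do_filter_py_spec : Claim_equal_do_filter_py := by
  intro docs condition _
  show do_filter_py docs condition = do_filter_py_alt docs condition
  rw [alt_eq_filter]
  unfold do_filter_py
  cases condition with
  | nil => simp [doTest, List.filter_true]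
  | cons kv rest => rfl
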